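-- pv_equiv track=rewrite | github.com/yheewon/Algorithm | 백준_신규아이디추천.py | solution
-- ===== SOURCE A (Python) =====
-- def solution(new_id):
--     answer = new_id.lower()
--
--     for i in answer :
--         if i not in "abcdefghijklmnopqrstuvwxyz0123456789-_." :
--             answer = answer.replace(i,'')
--
--     while ".." in answer :
--         answer = answer.replace("..", ".")
--
--     answer = answer.strip(".")
--
--     if len(answer) == 0 :
--         answer = 'a'
--
--     if len(answer) >= 16 :
--         answer = answer[0:15]
--
--     answer = answer.strip('.')
--
--     while len(answer) <= 2:
--         answer += answer[-1]
--
--     return answer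
-- ===== SOURCE B (Python) =====
-- ALLOWED = "abcdefghijklmnopqrstuvwxyz0123456789-_."
--
-- def solution(new_id):
--     # single left-to-right pass: filter, collapse dot-runs, drop leading dots
--     acc = []
--     for c in new_id.lower():
--         if c in ALLOWED:
--             if c == '.' and (not acc or acc[-1] == '.'):
--                 continue
--             acc.append(c)
--     while acc and acc[-1] == '.':
--         acc.pop()
--     answer = ''.join(acc)
--     if len(answer) == 0:
--         answer = 'a'
--     if len(answer) >= 16:
--         answer = answer[0:15]
--     answer = answer.strip('.')
--     while len(answer) <= 2:
--         answer += answer[-1]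
--     return answer
-- ===== Notes on version B (the rewrite author's own statement) =====
-- stated objective: alternative
-- what changed: A's multi-pass pipeline (one replace() scan per character of the lowered string, a dot-pair-replace fixpoint while loop, then strip) is replaced by a single left-to-right pass that fuses the character filter, the dot-run collapse and the leading-dot strip into one accumulator loop, followed by popping trailing dots; the empty-fallback/truncation/strip/padding tail is kept verbatim.
import Mathlib
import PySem

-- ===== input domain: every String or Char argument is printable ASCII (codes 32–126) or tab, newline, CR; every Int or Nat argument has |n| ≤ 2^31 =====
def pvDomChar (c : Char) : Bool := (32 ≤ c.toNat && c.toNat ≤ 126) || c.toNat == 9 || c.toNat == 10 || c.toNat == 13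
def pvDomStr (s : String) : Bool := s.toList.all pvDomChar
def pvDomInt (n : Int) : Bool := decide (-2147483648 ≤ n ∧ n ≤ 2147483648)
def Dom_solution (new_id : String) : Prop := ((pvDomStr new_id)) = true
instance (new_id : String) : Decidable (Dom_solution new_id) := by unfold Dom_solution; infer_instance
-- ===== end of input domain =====

-- B rebuilds the cleaned core in ONE left-to-right pass (filter + dot-run collapse + leading-dot skip fused),
-- replacing A's repeated replace() passes and the ".."-fixpoint while loop; same return value (objective: alternative).

def pvAllowed : List Char := "abcdefghijklmnopqrstuvwxyz0123456789-_.".toList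

-- structural form of PySem.Chars.replace for a nonempty pattern (needed for pvCollapse's termination)
def pvRep (o : Char) (old' new : List Char) : List Char → List Char
  | [] => []
  | c :: t =>
    if (o :: old').isPrefixOf (c :: t) then new ++ pvRep o old' new (List.drop old'.length t)
    else c :: pvRep o old' new t
termination_by l => l.length
decreasing_by
  all_goals (simp; try omega)

theorem pvRep_go_spec (o : Char) (old' new : List Char) :
    ∀ fuel l acc, l.length ≤ fuel →
      PySem.Chars.replace.go (o :: old') new fuel l acc = acc.reverse ++ pvRep o old' new l := by
  intro fuel
  induction fuel with
  | zero =>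
    intro l acc h
    have : l = [] := List.eq_nil_of_length_eq_zero (by omega)
    subst this
    simp [PySem.Chars.replace.go, pvRep]
  | succ n ih =>
    intro l acc h
    match l with
    | [] => simp [PySem.Chars.replace.go, pvRep]
    | c :: t =>
      rw [PySem.Chars.replace.go]
      by_cases hp : (o :: old').isPrefixOf (c :: t) = true
      · rw [if_pos hp]
        have hlen : (List.drop old'.length t).length ≤ n := by
          simp at h ⊢; omega
        rw [show List.drop (o :: old').length (c :: t) = List.drop old'.length t by simp]
        rw [ih _ _ hlen]
        rw [pvRep, if_pos hp]
        simp
      · rw [if_neg hp, ih t (c :: acc) (by simp at h ⊢; omega), pvRep, if_neg hp]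
        simp

theorem pvReplace_eq (s : List Char) (o : Char) (old' new : List Char) :
    PySem.Chars.replace s (o :: old') new = pvRep o old' new s := by
  rw [PySem.Chars.replace]
  simp only [List.isEmpty_cons, Bool.false_eq_true, if_false]
  exact pvRep_go_spec o old' new s.length s [] le_rfl

theorem pvRepDD_len_le (l : List Char) :
    (pvRep '.' ['.'] ['.'] l).length ≤ l.length := by
  induction l using pvRep.induct (o := '.') (old' := ['.']) with
  | case1 => simp [pvRep]
  | case2 c t hp ih =>
    rw [pvRep, if_pos hp]
    simp at ih ⊢
    omega
  | case3 c t hp ih =>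
    rw [pvRep, if_neg hp]
    simp
    omega

theorem pvRepDD_len_lt (l : List Char) (h : PySem.Chars.isIn ['.', '.'] l = true) :
    (pvRep '.' ['.'] ['.'] l).length < l.length := by
  induction l using pvRep.induct (o := '.') (old' := ['.']) with
  | case1 => simp [PySem.Chars.isIn_iff_infix] at h
  | case2 c t hp ih =>
    rw [pvRep, if_pos hp]
    have := pvRepDD_len_le (List.drop 1 t)
    have ht : t ≠ [] := by
      intro he; subst he; simp [List.isPrefixOf] at hp
    have h0 : 0 < t.length := List.length_pos_iff.mpr ht
    simp [pvRepDD_len_le (List.drop 1 t)] at *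
    omega
  | case3 c t hp ih =>
    rw [pvRep, if_neg hp]
    rw [PySem.Chars.isIn_iff_infix] at h
    rcases List.infix_cons_iff.mp h with hpre | hinf
    · exact absurd (List.isPrefixOf_iff_prefix.mpr hpre) hp
    · have := ih (by rw [PySem.Chars.isIn_iff_infix]; exact hinf)
      simp; omega

-- ===== PORT A =====
-- A, step for step: lower; for each char of the lowered string, replace(c,'') if not allowed;
-- while ".." in answer: replace("..","."); strip('.'); the 'a' / [0:15] / strip / padding tail.

def pvCollapse (cs : List Char) : List Char :=
  if PySem.Chars.isIn ['.', '.'] cs then pvCollapse (PySem.Chars.replace cs ['.', '.'] ['.']) else cs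
termination_by cs.length
decreasing_by
  rw [pvReplace_eq]
  exact pvRepDD_len_lt cs (by assumption)

def pvPadA (cs : List Char) : List Char :=
  if cs.length ≤ 2 then
    match PySem.List.pyGet? cs (-1) with
    | some c => pvPadA (cs ++ [c])
    | none => cs        -- unreachable here: cs is never empty at this point (Python would raise IndexError)
  else cs
termination_by 3 - cs.length
decreasing_by simp; omega

def solution (new_id : String) : String :=
  let a0 := PySem.Chars.lower new_id.toList
  let a1 := a0.foldl
    (fun s i => if PySem.Chars.isIn [i] pvAllowed then s else PySem.Chars.replace s [i] []) a0
  let a2 := pvCollapse a1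
  let a3 := PySem.Chars.stripChars a2 ['.']
  let a4 := if a3.length = 0 then ['a'] else a3
  let a5 := if 16 ≤ a4.length then PySem.Chars.slice a4 (some 0) (some 15) else a4
  let a6 := PySem.Chars.stripChars a5 ['.']
  String.ofList (pvPadA a6)

-- ===== PORT B =====
-- B, step for step: one pass over new_id.lower() appending allowed chars, skipping a '.' when the
-- accumulator is empty or ends in '.'; pop trailing dots; then the same tail as A.

def pvPopDots (acc : List Char) : List Char :=
  match h : acc.getLast? with
  | some c => if c == '.' then pvPopDots acc.dropLast else acc
  | none => acc
termination_by acc.length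
decreasing_by
  have : acc ≠ [] := by intro he; subst he; simp at h
  have : 0 < acc.length := List.length_pos_iff.mpr this
  simp; omega

def pvPadB (cs : List Char) : List Char :=
  if cs.length ≤ 2 then
    match PySem.List.pyGet? cs (-1) with
    | some c => pvPadB (cs ++ [c])
    | none => cs        -- unreachable here: cs is never empty at this point (Python would raise IndexError)
  else cs
termination_by 3 - cs.length
decreasing_by simp; omega

def solution_alt (new_id : String) : String :=
  let acc := (PySem.Chars.lower new_id.toList).foldl
    (fun acc c =>
      if PySem.Chars.isIn [c] pvAllowed then
        if c == '.' && (acc.isEmpty || acc.getLast? == some '.') then acc else acc ++ [c]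
      else acc) []
  let b2 := pvPopDots acc
  let b3 := if b2.length = 0 then ['a'] else b2
  let b4 := if 16 ≤ b3.length then PySem.Chars.slice b3 (some 0) (some 15) else b3
  let b5 := PySem.Chars.stripChars b4 ['.']
  String.ofList (pvPadB b5)

-- ===== PRECONDITION & SPEC =====
def Spec_solution (new_id : String) (out : String) : Prop := out = solution_alt new_id
instance (new_id : String) (out : String) : Decidable (Spec_solution new_id out) := by unfold Spec_solution; infer_instance

-- ===== CLAIM (what is proved, stated in full; the proofs are below) =====
def Claim_equal_solution : Prop := ∀ (new_id : String), Dom_solution new_id → Spec_solution new_id (solution new_id)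

-- ===== LEMMAS AND PROOFS =====

theorem pvRep_single (c : Char) (s : List Char) :
    pvRep c [] [] s = s.filter (fun x => x != c) := by
  induction s with
  | nil => simp [pvRep]
  | cons x t ih =>
    rw [pvRep]
    by_cases hx : x = c
    · subst hx
      simp [List.isPrefixOf, ih]
    · rw [if_neg (by simp [List.isPrefixOf]; exact fun h => absurd h.symm hx)]
      simp [hx, ih]

-- fold of remove-all passes = one filter
theorem pvFold_remove (q : Char → Bool) :
    ∀ (cs s0 : List Char),
      cs.foldl (fun s i => if q i then s else s.filter (fun x => x != i)) s0
        = s0.filter (fun x => q x || !(cs.contains x)) := by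
  intro cs
  induction cs with
  | nil => intro s0; simp
  | cons c t ih =>
    intro s0
    simp only [List.foldl_cons]
    by_cases hq : q c = true
    · rw [if_pos hq, ih]
      refine List.filter_congr ?_
      intro x _
      by_cases hx : x = c <;> simp [hx, hq]
    · rw [if_neg hq, ih, List.filter_filter]
      refine List.filter_congr ?_
      intro x _
      by_cases hx : x = c <;> simp [hx, hq]

-- collapse of dot runs, structurally
def pvSq : List Char → List Char
  | [] => []
  | [x] => [x]
  | x :: y :: t => if x == '.' && y == '.' then pvSq (y :: t) else x :: pvSq (y :: t)

def pvTq (a : Char) : List Char → List Char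
  | [] => []
  | c :: t => if c == '.' && a == '.' then pvTq a t else c :: pvTq c t

theorem pvSq_cons (a : Char) (l : List Char) : pvSq (a :: l) = a :: pvTq a l := by
  induction l generalizing a with
  | nil => simp [pvSq, pvTq]
  | cons c t ih =>
    rw [pvSq, pvTq]
    by_cases h : a = '.' ∧ c = '.'
    · obtain ⟨ha, hc⟩ := h; subst ha; subst hc
      simp [ih]
    · have hb : (a == '.' && c == '.') = false := by
        cases h1 : a == '.' <;> cases h2 : c == '.' <;> simp_all
      have hb' : (c == '.' && a == '.') = false := by
        cases h1 : a == '.' <;> cases h2 : c == '.' <;> simp_all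
      rw [hb, hb']
      simp [ih]

theorem pvSq_cons_ne (x : Char) (hx : x ≠ '.') (l : List Char) : pvSq (x :: l) = x :: pvSq l := by
  cases l with
  | nil => simp [pvSq]
  | cons c t => rw [pvSq, if_neg (by simp [hx])]

theorem pvSq_no_dd (l : List Char) (h : PySem.Chars.isIn ['.', '.'] l = false) : pvSq l = l := by
  induction l using pvSq.induct with
  | case1 => simp [pvSq]
  | case2 x => simp [pvSq]
  | case3 x y t hc ih =>
    exfalso
    rw [PySem.Chars.isIn_eq_false_iff] at h
    apply h
    obtain ⟨hx, hy⟩ : x = '.' ∧ y = '.' := by simpa using hc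
    subst hx; subst hy
    exact ⟨[], t, rfl⟩
  | case4 x y t hc ih =>
    rw [pvSq, if_neg (by simp_all)]
    rw [ih]
    rw [PySem.Chars.isIn_eq_false_iff] at h
    rw [PySem.Chars.isIn_eq_false_iff]
    exact fun hinf => h (List.infix_cons hinf)

theorem pvSq_rep (n : Nat) : ∀ l : List Char, l.length ≤ n →
    pvSq (pvRep '.' ['.'] ['.'] l) = pvSq l ∧
    pvSq ('.' :: pvRep '.' ['.'] ['.'] l) = pvSq ('.' :: l) := by
  induction n with
  | zero =>
    intro l hl
    have : l = [] := List.eq_nil_of_length_eq_zero (by omega)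
    subst this
    simp [pvRep]
  | succ n ih =>
    intro l hl
    cases l with
    | nil => simp [pvRep]
    | cons x u =>
      by_cases hdd : (['.', '.'] : List Char).isPrefixOf (x :: u) = true
      · cases u with
        | nil => simp [List.isPrefixOf] at hdd
        | cons y t =>
          obtain ⟨hx, hy⟩ : '.' = x ∧ '.' = y := by simpa [List.isPrefixOf] using hdd
          subst hx; subst hy
          have hrep : pvRep '.' ['.'] ['.'] ('.' :: '.' :: t) = '.' :: pvRep '.' ['.'] ['.'] t := by
            rw [pvRep, if_pos hdd]; simp
          have iht := ih t (by simp at hl; omega)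
          constructor
          · rw [hrep, iht.2, pvSq, if_pos (by simp)]
          · rw [hrep]
            rw [show pvSq ('.' :: '.' :: pvRep '.' ['.'] ['.'] t) = pvSq ('.' :: pvRep '.' ['.'] ['.'] t) by rw [pvSq, if_pos (by simp)]]
            rw [iht.2]
            rw [show pvSq ('.' :: '.' :: '.' :: t) = pvSq ('.' :: '.' :: t) by rw [pvSq, if_pos (by simp)]]
            rw [show pvSq ('.' :: '.' :: t) = pvSq ('.' :: t) by rw [pvSq, if_pos (by simp)]]
      · have hrep : pvRep '.' ['.'] ['.'] (x :: u) = x :: pvRep '.' ['.'] ['.'] u := by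
          rw [pvRep, if_neg hdd]
        have ihu := ih u (by simp at hl; omega)
        by_cases hx : x = '.'
        · subst hx
          cases u with
          | nil => simp [pvRep, pvSq]
          | cons y v =>
            have hy : y ≠ '.' := by
              intro hy; subst hy; exact hdd (by simp [List.isPrefixOf])
            have hrepu : pvRep '.' ['.'] ['.'] (y :: v) = y :: pvRep '.' ['.'] ['.'] v := by
              rw [pvRep, if_neg (by simp [List.isPrefixOf]; intro h; exact absurd h.symm hy)]
            have ihv := ih v (by simp at hl; omega)
            have key : pvSq ('.' :: y :: pvRep '.' ['.'] ['.'] v) = pvSq ('.' :: y :: v) := by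
              rw [pvSq, if_neg (by simp [hy]), pvSq_cons_ne y hy, ihv.1,
                  show pvSq ('.' :: y :: v) = '.' :: pvSq (y :: v) by rw [pvSq, if_neg (by simp [hy])],
                  pvSq_cons_ne y hy]
            constructor
            · rw [hrep, hrepu]; exact key
            · rw [hrep, hrepu]
              rw [show pvSq ('.' :: '.' :: y :: pvRep '.' ['.'] ['.'] v) = pvSq ('.' :: y :: pvRep '.' ['.'] ['.'] v) by rw [pvSq, if_pos (by simp)]]
              rw [key]
              rw [show pvSq ('.' :: '.' :: y :: v) = pvSq ('.' :: y :: v) by rw [pvSq, if_pos (by simp)]]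
        · constructor
          · rw [hrep, pvSq_cons_ne x hx, pvSq_cons_ne x hx, ihu.1]
          · rw [hrep]
            rw [show pvSq ('.' :: x :: pvRep '.' ['.'] ['.'] u) = '.' :: pvSq (x :: pvRep '.' ['.'] ['.'] u) by rw [pvSq, if_neg (by simp [hx])]]
            rw [show pvSq ('.' :: x :: u) = '.' :: pvSq (x :: u) by rw [pvSq, if_neg (by simp [hx])]]
            rw [pvSq_cons_ne x hx, pvSq_cons_ne x hx, ihu.1]

theorem pvCollapse_eq_sq (l : List Char) : pvCollapse l = pvSq l := by
  rw [pvCollapse]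
  by_cases h : PySem.Chars.isIn ['.', '.'] l = true
  · rw [if_pos h, pvReplace_eq]
    have hlt := pvRepDD_len_lt l h
    have := pvCollapse_eq_sq (pvRep '.' ['.'] ['.'] l)
    rw [this]
    exact (pvSq_rep l.length l le_rfl).1
  · rw [if_neg h, pvSq_no_dd l (by simpa using h)]
termination_by l.length
decreasing_by exact pvRepDD_len_lt l (by assumption)

-- dropWhile dots commutes with pvSq
theorem pvDrop_sq (l : List Char) :
    (pvSq l).dropWhile (fun c => c == '.') = pvSq (l.dropWhile (fun c => c == '.')) := by
  match l with
  | [] => simp [pvSq]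
  | x :: t =>
    by_cases hx : x = '.'
    · subst hx
      cases t with
      | nil => simp [pvSq, List.dropWhile]
      | cons y u =>
        by_cases hy : y = '.'
        · subst hy
          rw [pvSq, if_pos (by simp)]
          rw [show List.dropWhile (fun c => c == '.') ('.' :: '.' :: u) = List.dropWhile (fun c => c == '.') ('.' :: u) by simp [List.dropWhile_cons]]
          exact pvDrop_sq ('.' :: u)
        · rw [pvSq, if_neg (by simp [hy])]
          rw [pvSq_cons_ne y hy]
          rw [show List.dropWhile (fun c => c == '.') ('.' :: y :: pvSq u) = List.dropWhile (fun c => c == '.') (y :: pvSq u) by simp [List.dropWhile_cons]]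
          rw [show List.dropWhile (fun c => c == '.') (y :: pvSq u) = y :: pvSq u by simp [List.dropWhile_cons, hy]]
          rw [show List.dropWhile (fun c => c == '.') ('.' :: y :: u) = y :: u by simp [List.dropWhile_cons, hy]]
          rw [pvSq_cons_ne y hy]
    · rw [pvSq_cons_ne x hx]
      rw [show List.dropWhile (fun c => c == '.') (x :: pvSq t) = x :: pvSq t by simp [List.dropWhile_cons, hx]]
      rw [show List.dropWhile (fun c => c == '.') (x :: t) = x :: t by simp [List.dropWhile_cons, hx]]
      rw [pvSq_cons_ne x hx]
termination_by l.length

-- B's fold with a last element known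
theorem pvFoldB_last (l : List Char) : ∀ (acc : List Char) (a : Char),
    l.foldl (fun acc c => if c == '.' && (acc.isEmpty || acc.getLast? == some '.') then acc else acc ++ [c]) (acc ++ [a])
      = acc ++ [a] ++ pvTq a l := by
  induction l with
  | nil => intro acc a; simp [pvTq]
  | cons c t ih =>
    intro acc a
    rw [List.foldl_cons, pvTq]
    have hcond : (c == '.' && ((acc ++ [a]).isEmpty || (acc ++ [a]).getLast? == some '.'))
        = (c == '.' && a == '.') := by
      have h1 : (acc ++ [a]).isEmpty = false := by cases acc <;> simp
      simp [List.getLast?_concat, h1]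
    rw [hcond]
    by_cases h : (c == '.' && a == '.') = true
    · rw [if_pos h, if_pos h, ih]
    · rw [if_neg h, if_neg h]
      rw [show acc ++ [a] ++ [c] = (acc ++ [a]) ++ [c] by simp]
      rw [ih (acc ++ [a]) c]
      simp

theorem pvFoldB_nil (l : List Char) :
    l.foldl (fun acc c => if c == '.' && (acc.isEmpty || acc.getLast? == some '.') then acc else acc ++ [c]) []
      = pvSq (l.dropWhile (fun c => c == '.')) := by
  induction l with
  | nil => simp [pvSq]
  | cons c t ih =>
    rw [List.foldl_cons]
    by_cases hc : c = '.'
    · subst hc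
      rw [if_pos (by simp)]
      rw [ih]
      simp [List.dropWhile_cons]
    · rw [if_neg (by simp [hc])]
      rw [pvFoldB_last t [] c]
      rw [show List.dropWhile (fun x => x == '.') (c :: t) = c :: t by simp [List.dropWhile_cons, hc]]
      rw [pvSq_cons c t]
      simp

theorem pvPopDots_eq (l : List Char) :
    pvPopDots l = ((l.reverse.dropWhile (fun c => c == '.')).reverse) := by
  induction l using List.reverseRecOn with
  | nil => rw [pvPopDots]; simp
  | append_singleton t a ih =>
    rw [pvPopDots]
    split
    next c hsome =>
      have hca : c = a := by
        rw [List.getLast?_concat] at hsome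
        exact (Option.some.inj hsome).symm
      subst hca
      rw [List.dropLast_concat]
      by_cases hd : c = '.'
      · subst hd
        rw [if_pos (by simp), ih]
        simp [List.dropWhile_cons]
      · rw [if_neg (by simp [hd])]
        simp [List.dropWhile_cons, hd]
    next hnone =>
      rw [List.getLast?_concat] at hnone
      cases hnone

theorem pvStripDots (s : List Char) :
    PySem.Chars.stripChars s ['.'] =
      ((s.dropWhile (fun c => c == '.')).reverse.dropWhile (fun c => c == '.')).reverse := by
  rw [PySem.Chars.stripChars]
  have hp : (fun c => (['.'] : List Char).contains c) = (fun c : Char => c == '.') := by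
    funext c
    by_cases h : c = '.' <;> simp [h]
  rw [hp]

theorem pvPad_eq (cs : List Char) : pvPadA cs = pvPadB cs := by
  rw [pvPadA, pvPadB]
  by_cases h : cs.length ≤ 2
  · rw [if_pos h, if_pos h]
    cases hg : PySem.List.pyGet? cs (-1) with
    | none => rfl
    | some c =>
      simp only []
      exact pvPad_eq (cs ++ [c])
  · rw [if_neg h, if_neg h]
termination_by 3 - cs.length
decreasing_by simp; omega

theorem pvCore_eq (l : List Char) :
    PySem.Chars.stripChars
      (pvCollapse (l.foldl (fun s i => if PySem.Chars.isIn [i] pvAllowed then s else PySem.Chars.replace s [i] []) l)) ['.']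
    = pvPopDots (l.foldl
        (fun acc c =>
          if PySem.Chars.isIn [c] pvAllowed then
            if c == '.' && (acc.isEmpty || acc.getLast? == some '.') then acc else acc ++ [c]
          else acc) []) := by
  have hA : (l.foldl (fun s i => if PySem.Chars.isIn [i] pvAllowed then s else PySem.Chars.replace s [i] []) l)
      = l.filter (fun x => PySem.Chars.isIn [x] pvAllowed) := by
    have hfun : (fun (s : List Char) (i : Char) => if PySem.Chars.isIn [i] pvAllowed then s else PySem.Chars.replace s [i] [])
        = (fun (s : List Char) (i : Char) => if PySem.Chars.isIn [i] pvAllowed then s else s.filter (fun x => x != i)) := by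
      funext s i
      by_cases h : PySem.Chars.isIn [i] pvAllowed <;>
        simp [h, pvReplace_eq, pvRep_single]
    rw [hfun, pvFold_remove]
    refine List.filter_congr ?_
    intro x hx
    simp [hx]
  have hB : (l.foldl
        (fun acc c =>
          if PySem.Chars.isIn [c] pvAllowed then
            if c == '.' && (acc.isEmpty || acc.getLast? == some '.') then acc else acc ++ [c]
          else acc) [])
      = ((l.filter (fun x => PySem.Chars.isIn [x] pvAllowed)).foldl
          (fun acc c => if c == '.' && (acc.isEmpty || acc.getLast? == some '.') then acc else acc ++ [c]) []) := by
    rw [List.foldl_filter]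
  rw [hA, hB, pvFoldB_nil, pvCollapse_eq_sq, pvStripDots, pvPopDots_eq, ← pvDrop_sq]

-- ===== VERDICT (by name: the statement is the Claim_ definition above) =====
theorem solution_spec : Claim_equal_solution := by
  intro new_id _
  unfold Spec_solution solution solution_alt
  simp only [pvCore_eq (PySem.Chars.lower new_id.toList), pvPad_eq]
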